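-- pv_equiv track=rewrite | github.com/GITCHAT10/legal-docs | mnos/modules/xport/service.py | _allocate_resource
-- ===== SOURCE A (Python) =====
-- from typing import Dict, Any, Optional
--
-- def _allocate_resource(registry: Dict[str, Any], entity_id: str) -> str:
--     # Check if already allocated (idempotency within resource map)
--     for rid, eid in registry.items():
--         if eid == entity_id:
--             return rid
--
--     # New Allocation
--     for rid, eid in registry.items():
--         if eid is None:
--             registry[rid] = entity_id
--             return rid
--
--     raise RuntimeError("Capacity Exhausted: No resources available in national grid")
-- ===== SOURCE B (Python) =====
-- def _allocate_resource(registry, entity_id):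
--     # Single pass: return an existing allocation immediately; remember the first free slot.
--     free = None
--     for rid, eid in registry.items():
--         if eid == entity_id:
--             return rid
--         if eid is None and free is None:
--             free = rid
--     if free is not None:
--         registry[free] = entity_id
--         return free
--     raise RuntimeError("Capacity Exhausted: No resources available in national grid")
-- ===== Notes on version B (the rewrite author's own statement) =====
-- stated objective: simpler
-- what changed: The two sequential scans (match scan, then free-slot scan) are fused into one pass that returns an existing allocation immediately and remembers only the first free slot, keeping the allocation-over-free priority.
import Mathlib
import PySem

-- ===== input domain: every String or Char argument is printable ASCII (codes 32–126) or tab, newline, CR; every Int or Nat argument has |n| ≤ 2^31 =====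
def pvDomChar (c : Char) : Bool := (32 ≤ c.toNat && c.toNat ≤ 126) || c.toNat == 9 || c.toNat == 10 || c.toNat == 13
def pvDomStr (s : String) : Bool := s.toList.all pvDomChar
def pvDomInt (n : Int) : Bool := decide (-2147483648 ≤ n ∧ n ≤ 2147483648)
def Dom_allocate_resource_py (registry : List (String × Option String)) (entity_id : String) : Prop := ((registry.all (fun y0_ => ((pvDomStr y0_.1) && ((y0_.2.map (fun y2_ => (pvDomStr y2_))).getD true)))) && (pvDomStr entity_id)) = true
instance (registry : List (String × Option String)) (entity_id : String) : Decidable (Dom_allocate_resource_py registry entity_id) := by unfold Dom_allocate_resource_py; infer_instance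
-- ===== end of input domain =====

-- B fuses A's two scans into one pass; both programs mutate `registry` identically
-- (the chosen free slot is assigned entity_id) — the equivalence proved here is about the return value.
-- ===== PORT A =====
-- first loop of A: find rid whose eid == entity_id
def aScanMatch (registry : List (String × Option String)) (entity_id : String) : Option String :=
  match registry with
  | [] => none
  | (rid, eid) :: rest =>
    if eid == some entity_id then some rid else aScanMatch rest entity_id

-- second loop of A: find first rid whose eid is None
def aScanFree (registry : List (String × Option String)) : Option String :=
  match registry with
  | [] => none
  | (rid, eid) :: rest =>
    if eid == none then some rid else aScanFree rest

def allocate_resource_py (registry : List (String × Option String)) (entity_id : String) : String :=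
  match aScanMatch registry entity_id with
  | some rid => rid
  | none =>
    match aScanFree registry with
    | some rid => rid
    | none => ""  -- A raises RuntimeError here; excluded by Pre_

-- ===== PORT B =====
-- single pass with an optional first-free-slot accumulator
def bScan (registry : List (String × Option String)) (entity_id : String) (free : Option String) : String :=
  match registry with
  | [] =>
    match free with
    | some rid => rid
    | none => ""  -- B raises RuntimeError here; excluded by Pre_
  | (rid, eid) :: rest =>
    if eid == some entity_id then rid
    else if eid == none && free == none then bScan rest entity_id (some rid)
    else bScan rest entity_id free

def allocate_resource_py_alt (registry : List (String × Option String)) (entity_id : String) : String :=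
  bScan registry entity_id none

-- ===== PRECONDITION & SPEC =====
-- Pre_ excludes exactly the inputs on which A (and B) raise RuntimeError:
-- no entry allocated to entity_id and no free (None) entry.
def Pre_allocate_resource_py (registry : List (String × Option String)) (entity_id : String) : Prop :=
  (registry.any (fun p => p.2 == some entity_id) || registry.any (fun p => p.2 == none)) = true

instance (registry : List (String × Option String)) (entity_id : String) : Decidable (Pre_allocate_resource_py registry entity_id) := by unfold Pre_allocate_resource_py; infer_instance

def pvWitness_allocate_resource_py : (List (String × Option String)) × String :=
  ([("r1", some "a"), ("r2", none)], "b")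

def Spec_allocate_resource_py (registry : List (String × Option String)) (entity_id : String) (out : String) : Prop := out = allocate_resource_py_alt registry entity_id
instance (registry : List (String × Option String)) (entity_id : String) (out : String) : Decidable (Spec_allocate_resource_py registry entity_id out) := by unfold Spec_allocate_resource_py; infer_instance

-- ===== CLAIM (what is proved, stated in full; the proofs are below) =====
def Claim_equal_allocate_resource_py : Prop := ∀ (registry : List (String × Option String)) (entity_id : String), Dom_allocate_resource_py registry entity_id → Pre_allocate_resource_py registry entity_id → Spec_allocate_resource_py registry entity_id (allocate_resource_py registry entity_id)

-- ===== LEMMAS AND PROOFS =====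
-- B's single pass equals: first match if any, else the earlier-recorded free slot, else A's free scan.
theorem bScan_eq (registry : List (String × Option String)) (entity_id : String) (free : Option String) :
    bScan registry entity_id free =
      match aScanMatch registry entity_id with
      | some rid => rid
      | none =>
        match free with
        | some f => f
        | none =>
          match aScanFree registry with
          | some rid => rid
          | none => "" := by
  induction registry generalizing free with
  | nil => simp [bScan, aScanMatch, aScanFree]
  | cons hd tl ih =>
    obtain ⟨rid, eid⟩ := hd
    simp only [bScan, aScanMatch, aScanFree]
    by_cases hm : eid == some entity_id
    · simp [hm]
    · simp only [hm]
      by_cases hn : eid == none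
      · cases free with
        | none => simp [hn, ih]
        | some f => simp [hn, ih]
      · simp [hn, ih]

-- ===== VERDICT (by name: the statement is the Claim_ definition above) =====
theorem allocate_resource_py_spec : Claim_equal_allocate_resource_py := by
  intro registry entity_id _ _
  unfold Spec_allocate_resource_py allocate_resource_py allocate_resource_py_alt
  rw [bScan_eq]
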